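-- pv_equiv track=rewrite | github.com/A-Lex-McLee/PATTERNIZE | Patternization_main.py | _catCombinations
-- ===== SOURCE A (Python) =====
-- from itertools import permutations, combinations
--
-- def _catCombinations(cats, length=3, catCondition="N.C"):
--     """
--     aux_@_combinatorialFlexibility
--     creates all n_C_k combinations c over {cats}, with n = len(cats),
--                                                             k = {length};
--     if not catCondition or catCondition in c, c is added to output list.
--
--     Parameters
--     ----------
--     cats : TYPE:      str;
--         DESCRIPTION:  category label
--     length : TYPE:    int;
--         DESCRIPTION:  length of combination (subset) in {cats}.
--                       The default is 3.
--     catCondition :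
--         TYPE:         None or str, optional;
--         DESCRIPTION.  specifies a category that must be contained in every
--                       combination; normally a nominal category.
--                       The default is "N.C".
--
--     Raises
--     ------
--     ValueError
--         DESCRIPTION:  if len(cats) < 2 || length < 2 || len(cats) < length.
--
--
--     Returns
--     -------
--     TYPE:             tuple
--         DESCRIPTION:  of tuples = combinations of length {length},
--                       potentially satifying {catCondition}.
--
--     """
--     if len(cats) < 2 or length < 2 or len(cats) < length:
--         raise ValueError("Inappropriate size values!")
--     out = []
--     combi_nations = combinations(cats, r = length)
--     try:
--         while True:
--             combi = next(combi_nations)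
--             if not catCondition or (catCondition in combi):
--                 out.append(combi)
--     except StopIteration:
--         return tuple(out)
-- ===== SOURCE B (Python) =====
-- def _catCombinations(cats, length=3, catCondition="N.C"):
--     if len(cats) < 2 or length < 2 or len(cats) < length:
--         raise ValueError("Inappropriate size values!")
--
--     def go(items, k, need, avail):
--         # avail = number of occurrences of catCondition left in items
--         if k == 0:
--             return [] if need else [()]
--         if len(items) < k or (need and avail == 0):
--             return []
--         head, rest = items[0], items[1:]
--         avail_rest = avail - 1 if head == catCondition else avail
--         with_head = [(head,) + t
--                      for t in go(rest, k - 1, need and head != catCondition, avail_rest)]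
--         return with_head + go(rest, k, need, avail_rest)
--
--     need = bool(catCondition)
--     items = list(cats)
--     return tuple(go(items, length, need, items.count(catCondition) if need else 0))
-- ===== Notes on version B (the rewrite author's own statement) =====
-- stated objective: faster
-- what changed: Instead of enumerating all C(n,k) combinations and filtering afterwards, B builds combinations recursively and prunes every branch that can no longer contain the required element (tracking how many occurrences remain); intended as faster (a timing run read B faster wherever both finished and A timed out on sizes where B returned, but could not confirm a stable ratio).
import Mathlib
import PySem

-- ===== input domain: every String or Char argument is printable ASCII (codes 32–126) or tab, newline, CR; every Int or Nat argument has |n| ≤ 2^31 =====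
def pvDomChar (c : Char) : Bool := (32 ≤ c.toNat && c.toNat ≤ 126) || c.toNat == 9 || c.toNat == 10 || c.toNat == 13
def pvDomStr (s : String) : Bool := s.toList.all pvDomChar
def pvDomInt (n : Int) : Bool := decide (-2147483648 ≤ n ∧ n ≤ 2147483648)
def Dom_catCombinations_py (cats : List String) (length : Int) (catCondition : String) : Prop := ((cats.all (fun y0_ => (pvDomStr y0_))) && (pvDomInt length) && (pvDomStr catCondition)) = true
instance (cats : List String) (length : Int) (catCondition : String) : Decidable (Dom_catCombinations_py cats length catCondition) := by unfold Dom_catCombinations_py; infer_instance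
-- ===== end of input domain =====

-- B prunes the combination recursion so only combinations that can still contain the
-- required element are built, instead of enumerating all C(n,k) and filtering; intended
-- as faster (a timing run read B faster wherever both finished and A timed out on
-- sizes where B returned, but could not confirm a stable ratio).
-- Equivalence on Pre_ (where A does not raise).

-- ===== PORT A =====
-- itertools.combinations(cats, r) in its generation order (lexicographic by index)
def pvCombA : List String → Nat → List (List String)
  | _, 0 => [[]]
  | [], _ + 1 => []
  | x :: xs, k + 1 => (pvCombA xs k).map (x :: ·) ++ pvCombA xs (k + 1)

def catCombinations_py (cats : List String) (length : Int) (catCondition : String) : List (List String) :=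
  if cats.length < 2 ∨ length < 2 ∨ (cats.length : Int) < length then []  -- A raises ValueError here (outside Pre_)
  else
    (pvCombA cats length.toNat).foldl
      (fun out combi => if catCondition = "" ∨ combi.contains catCondition then out ++ [combi] else out) []

-- ===== PORT B =====
-- go(items, k, need, avail) from Source B; avail = occurrences of catCondition left in items
def pvGoB (cond : String) : List String → Nat → Bool → Int → List (List String)
  | _, 0, need, _ => if need then [] else [[]]
  | [], _ + 1, _, _ => []
  | head :: rest, k + 1, need, avail =>
      if (head :: rest).length < k + 1 ∨ (need = true ∧ avail = 0) then []
      else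
        let availRest := if head = cond then avail - 1 else avail
        (pvGoB cond rest k (need && !(head == cond)) availRest).map (head :: ·)
          ++ pvGoB cond rest (k + 1) need availRest

def catCombinations_py_alt (cats : List String) (length : Int) (catCondition : String) : List (List String) :=
  if cats.length < 2 ∨ length < 2 ∨ (cats.length : Int) < length then []  -- B raises ValueError here too (outside Pre_)
  else
    let need : Bool := catCondition != ""
    pvGoB catCondition cats length.toNat need
      (if need then PySem.List.count cats catCondition else 0)

-- ===== PRECONDITION & SPEC =====
-- Pre_ excludes exactly the inputs where both A and B raise ValueError (the documented size check).
def Pre_catCombinations_py (cats : List String) (length : Int) (catCondition : String) : Prop :=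
  2 ≤ cats.length ∧ 2 ≤ length ∧ length ≤ (cats.length : Int)
instance (cats : List String) (length : Int) (catCondition : String) : Decidable (Pre_catCombinations_py cats length catCondition) := by unfold Pre_catCombinations_py; infer_instance
def pvWitness_catCombinations_py : List String × Int × String := (["N.C", "a", "b"], 2, "N.C")

def Spec_catCombinations_py (cats : List String) (length : Int) (catCondition : String) (out : List (List String)) : Prop := out = catCombinations_py_alt cats length catCondition
instance (cats : List String) (length : Int) (catCondition : String) (out : List (List String)) : Decidable (Spec_catCombinations_py cats length catCondition out) := by unfold Spec_catCombinations_py; infer_instance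

-- ===== CLAIM (what is proved, stated in full; the proofs are below) =====
def Claim_equal_catCombinations_py : Prop := ∀ (cats : List String) (length : Int) (catCondition : String), Dom_catCombinations_py cats length catCondition → Pre_catCombinations_py cats length catCondition → Spec_catCombinations_py cats length catCondition (catCombinations_py cats length catCondition)

-- ===== LEMMAS AND PROOFS =====

theorem pv_foldl_append_id (l : List (List String)) (acc : List (List String)) :
    l.foldl (fun out c => out ++ [c]) acc = acc ++ l := by
  induction l generalizing acc with
  | nil => simp
  | cons x xs ih => simp [List.foldl, ih]

theorem pvCombA_nil_of_lt : ∀ (items : List String) (k : Nat), items.length < k → pvCombA items k = [] := by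
  intro items
  induction items with
  | nil => intro k hk; cases k with
      | zero => omega
      | succ k => rfl
  | cons h rest ih =>
      intro k hk
      cases k with
      | zero => omega
      | succ k =>
        simp only [pvCombA]
        rw [ih k (by simpa using hk), ih (k + 1) (by simp at hk ⊢; omega)]
        rfl

theorem pvCombA_mem_subset : ∀ (items : List String) (k : Nat) (c : List String),
    c ∈ pvCombA items k → ∀ x ∈ c, x ∈ items := by
  intro items
  induction items with
  | nil => intro k c hc x hx; cases k with
      | zero => simp [pvCombA] at hc; subst hc; simp at hx
      | succ k => simp [pvCombA] at hc
  | cons h rest ih =>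
      intro k c hc x hx
      cases k with
      | zero =>
        simp [pvCombA] at hc; subst hc; simp at hx
      | succ k =>
        simp only [pvCombA, List.mem_append, List.mem_map] at hc
        rcases hc with ⟨t, ht, rfl⟩ | hc
        · rcases List.mem_cons.mp hx with rfl | hx
          · exact List.mem_cons_self
          · exact List.mem_cons_of_mem _ (ih k t ht x hx)
        · exact List.mem_cons_of_mem _ (ih (k + 1) c hc x hx)

theorem pvGoB_false : ∀ (cond : String) (items : List String) (k : Nat) (avail : Int),
    pvGoB cond items k false avail = pvCombA items k := by
  intro cond items
  induction items with
  | nil => intro k avail; cases k <;> rfl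
  | cons h rest ih =>
      intro k avail
      cases k with
      | zero => rfl
      | succ k =>
        simp only [pvGoB, Bool.false_and]
        by_cases hlen : (h :: rest).length < k + 1
        · simp only [hlen, true_or, if_true]
          simp only [pvCombA]
          rw [pvCombA_nil_of_lt rest k (by simp at hlen; omega),
              pvCombA_nil_of_lt rest (k + 1) (by simp at hlen; omega)]
          rfl
        · rw [if_neg (by rintro (h | ⟨h, -⟩); exact hlen h; cases h)]
          simp only [pvCombA]
          rw [ih, ih]

theorem pvFilter_nil_of_not_mem (cond : String) (items : List String) (k : Nat)
    (h : cond ∉ items) :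
    (pvCombA items k).filter (fun c => c.contains cond) = [] := by
  apply List.filter_eq_nil_iff.mpr
  intro c hc
  simp only [List.contains_eq_mem, decide_eq_true_eq]
  intro hmem
  exact h (pvCombA_mem_subset items k c hc cond hmem)

theorem pvGoB_true : ∀ (cond : String) (items : List String) (k : Nat) (avail : Int),
    avail = (items.count cond : Int) →
    pvGoB cond items k true avail = (pvCombA items k).filter (fun c => c.contains cond) := by
  intro cond items
  induction items with
  | nil =>
      intro k avail h
      cases k with
      | zero => simp [pvGoB, pvCombA]
      | succ k => rfl
  | cons hd rest ih =>
      intro k avail havail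
      cases k with
      | zero => simp [pvGoB, pvCombA]
      | succ k =>
        simp only [pvGoB]
        by_cases hlen : (hd :: rest).length < k + 1
        · simp only [hlen, true_or, if_true]
          rw [pvCombA_nil_of_lt _ _ hlen]
          rfl
        · by_cases hav : avail = 0
          · simp only [hav, hlen, false_or, true_and, if_true]
            have hz : (hd :: rest).count cond = 0 := by
              have := havail; rw [hav] at this
              exact_mod_cast this.symm
            exact (pvFilter_nil_of_not_mem cond (hd :: rest) (k + 1)
              (List.count_eq_zero.mp hz)).symm
          · simp only [hlen, hav, false_or, and_false, if_false]
            simp only [pvCombA, List.filter_append, List.filter_map]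
            by_cases hhd : hd = cond
            · subst hhd
              simp only [beq_self_eq_true, Bool.not_true, Bool.and_false, if_true]
              rw [pvGoB_false]
              have hcnt : avail - 1 = (rest.count hd : Int) := by
                rw [havail, List.count_cons_self]; push_cast; ring
              rw [ih (k + 1) (avail - 1) hcnt]
              congr 1
              have : (List.filter ((fun c => c.contains hd) ∘ (hd :: ·)) (pvCombA rest k))
                  = pvCombA rest k := by
                apply List.filter_eq_self.mpr
                intro t _
                simp [List.contains_eq_mem]
              rw [Function.comp_def] at this ⊢
              rw [this]
            · have hbeq : (hd == cond) = false := by simp [hhd]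
              simp only [hhd, if_false, hbeq, Bool.not_false, Bool.and_true]
              have hcnt : avail = (rest.count cond : Int) := by
                rw [havail, List.count_cons_of_ne hhd]
              rw [ih k avail hcnt, ih (k + 1) avail hcnt]
              congr 1
              rw [Function.comp_def]
              have : ∀ t : List String, ((hd :: t).contains cond) = t.contains cond := by
                intro t
                simp only [List.contains_eq_mem, List.mem_cons, decide_eq_decide]
                exact or_iff_right (fun h => hhd h.symm)
              simp only [this]

-- ===== VERDICT (by name: the statement is the Claim_ definition above) =====
theorem catCombinations_py_spec : Claim_equal_catCombinations_py := by
  intro cats length catCondition _ hpre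
  unfold Spec_catCombinations_py catCombinations_py catCombinations_py_alt
  obtain ⟨h1, h2, h3⟩ := hpre
  have hguard : ¬(cats.length < 2 ∨ length < 2 ∨ (cats.length : Int) < length) := by
    rintro (h | h | h) <;> omega
  rw [if_neg hguard, if_neg hguard]
  by_cases hc : catCondition = ""
  · subst hc
    simp only [show ("" != "") = false from rfl]
    rw [pvGoB_false]
    simp only [true_or, if_true]
    rw [pv_foldl_append_id]
    simp
  · have hne : (catCondition != "") = true := by simp [hc]
    simp only [hne, if_true]
    rw [PySem.List.count_eq]
    rw [pvGoB_true catCondition cats length.toNat _ rfl]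
    have : ∀ (out : List (List String)) (combi : List String),
        (if catCondition = "" ∨ combi.contains catCondition = true then out ++ [combi] else out)
        = (if combi.contains catCondition = true then out ++ [combi] else out) := by
      intro out combi
      by_cases h : combi.contains catCondition = true <;> simp [h, hc]
    simp only [this]
    rw [PySem.List.foldl_append_if_eq_filter]
    simp
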